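-- pv_equiv track=rewrite | github.com/shkurtagashi/DataAnalysis | EDA.py | interval
-- ===== SOURCE A (Python) =====
-- def interval(time, beg, en):
--     j = 0;
--     interv = [];
--
--     for j in range(len(time)):
--         if time[j] == beg:
--             beginning = j
--
--         if time[j] == en:
--             end = j
--
--     interv = [beginning, end]
--     return interv
-- ===== SOURCE B (Python) =====
-- def interval(time, beg, en):
--     for j in reversed(range(len(time))):
--         if time[j] == beg:
--             beginning = j
--             break
--     for j in reversed(range(len(time))):
--         if time[j] == en:
--             end = j
--             break
--     return [beginning, end]
-- ===== Notes on version B (the rewrite author's own statement) =====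
-- stated objective: alternative
-- what changed: Replaces A's single forward overwriting scan with two separate backward scans that each stop at the first match from the end (the last occurrence), leaving the variable unbound when absent just as A does.
import Mathlib
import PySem

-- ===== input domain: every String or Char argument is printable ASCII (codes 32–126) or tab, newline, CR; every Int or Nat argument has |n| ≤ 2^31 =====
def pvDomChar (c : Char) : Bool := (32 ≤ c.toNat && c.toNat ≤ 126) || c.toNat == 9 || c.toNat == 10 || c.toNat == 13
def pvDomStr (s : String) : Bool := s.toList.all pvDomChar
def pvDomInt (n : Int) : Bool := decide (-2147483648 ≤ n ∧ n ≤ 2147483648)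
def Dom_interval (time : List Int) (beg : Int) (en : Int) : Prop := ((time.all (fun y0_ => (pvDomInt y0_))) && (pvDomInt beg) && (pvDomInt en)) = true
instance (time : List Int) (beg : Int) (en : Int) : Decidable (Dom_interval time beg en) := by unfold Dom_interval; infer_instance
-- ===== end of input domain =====

-- B replaces A's forward overwriting scan by two backward scans stopping at the first match from the end (alternative decomposition, same cost).


-- ===== PORT A =====
-- A: one forward pass over range(len(time)), each match overwrites 'beginning'/'end'.
-- The unbound variables are modelled as Options; 'none' at the end = UnboundLocalError
-- (excluded by Pre_interval), where the port defaults to 0.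
def interval (time : List Int) (beg : Int) (en : Int) : List Int :=
  let st := (List.range time.length).foldl
    (fun (s : Option Int × Option Int) j =>
      let s1 := if time.getD j 0 = beg then (some (Int.ofNat j), s.2) else s
      if time.getD j 0 = en then (s1.1, some (Int.ofNat j)) else s1)
    (none, none)
  [st.1.getD 0, st.2.getD 0]

-- ===== PORT B =====
-- B: scan the reversed index list, first match (with break) = last occurrence.
def findLastRev (time : List Int) (target : Int) : List Nat → Option Int
  | [] => none
  | j :: rest => if time.getD j 0 = target then some (Int.ofNat j) else findLastRev time target rest

def interval_alt (time : List Int) (beg : Int) (en : Int) : List Int :=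
  let b := findLastRev time beg (List.range time.length).reverse
  let e := findLastRev time en (List.range time.length).reverse
  [b.getD 0, e.getD 0]

-- ===== PRECONDITION & SPEC =====
-- Pre_ excludes exactly the inputs on which A (and B) raise UnboundLocalError: beg or en absent from time.
def Pre_interval (time : List Int) (beg : Int) (en : Int) : Prop := beg ∈ time ∧ en ∈ time
instance (time : List Int) (beg : Int) (en : Int) : Decidable (Pre_interval time beg en) := by unfold Pre_interval; infer_instance
def pvWitness_interval : List Int × Int × Int := ([1, 2, 1], 1, 2)

def Spec_interval (time : List Int) (beg : Int) (en : Int) (out : List Int) : Prop := out = interval_alt time beg en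
instance (time : List Int) (beg : Int) (en : Int) (out : List Int) : Decidable (Spec_interval time beg en out) := by unfold Spec_interval; infer_instance

-- ===== CLAIM (what is proved, stated in full; the proofs are below) =====
def Claim_equal_interval : Prop := ∀ (time : List Int) (beg : Int) (en : Int), Dom_interval time beg en → Pre_interval time beg en → Spec_interval time beg en (interval time beg en)

-- ===== LEMMAS AND PROOFS =====

theorem findLastRev_append (time : List Int) (t : Int) (l1 l2 : List Nat) :
    findLastRev time t (l1 ++ l2) =
      (match findLastRev time t l1 with
       | some j => some j
       | none => findLastRev time t l2) := by
  induction l1 with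
  | nil => simp [findLastRev]
  | cons x xs ih =>
    simp only [List.cons_append, findLastRev]
    split_ifs with h <;> simp [ih]

theorem foldl_last_eq_findLastRev (time : List Int) (t : Int) (l : List Nat) (a : Option Int) :
    l.foldl (fun (acc : Option Int) j => if time.getD j 0 = t then some (Int.ofNat j) else acc) a =
      (match findLastRev time t l.reverse with
       | some j => some j
       | none => a) := by
  induction l generalizing a with
  | nil => simp [findLastRev]
  | cons x xs ih =>
    simp only [List.foldl_cons, List.reverse_cons, findLastRev_append, ih]
    cases findLastRev time t xs.reverse with
    | some j => rfl
    | none => simp only [findLastRev]; split_ifs <;> rfl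

-- the pair fold of A splits into two independent scalar folds
theorem foldl_pair_split (time : List Int) (beg en : Int) (l : List Nat) (s : Option Int × Option Int) :
    l.foldl
      (fun (s : Option Int × Option Int) j =>
        let s1 := if time.getD j 0 = beg then (some (Int.ofNat j), s.2) else s
        if time.getD j 0 = en then (s1.1, some (Int.ofNat j)) else s1)
      s =
    (l.foldl (fun acc j => if time.getD j 0 = beg then some (Int.ofNat j) else acc) s.1,
     l.foldl (fun acc j => if time.getD j 0 = en then some (Int.ofNat j) else acc) s.2) := by
  induction l generalizing s with
  | nil => rfl
  | cons x xs ih =>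
    simp only [List.foldl_cons, ih]
    split_ifs with h1 h2 <;> rfl

theorem interval_eq_alt (time : List Int) (beg en : Int) :
    interval time beg en = interval_alt time beg en := by
  unfold interval interval_alt
  rw [foldl_pair_split]
  simp only [foldl_last_eq_findLastRev]
  cases findLastRev time beg (List.range time.length).reverse <;>
    cases findLastRev time en (List.range time.length).reverse <;> rfl

-- ===== VERDICT (by name: the statement is the Claim_ definition above) =====
theorem interval_spec : Claim_equal_interval := by
  intro time beg en _ _
  unfold Spec_interval
  exact interval_eq_alt time beg en
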